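-- pv_equiv track=rewrite | github.com/yushengsheng/wenjian-chuli | spreadsheet_tool/processor.py | make_unique_rename_map
-- ===== SOURCE A (Python) =====
-- def make_unique_rename_map(rename_map: dict[str, str]) -> dict[str, str]:
--     seen: dict[str, int] = {}
--     unique_map: dict[str, str] = {}
--     for original, target in rename_map.items():
--         count = seen.get(target, 0)
--         if count == 0:
--             unique_map[original] = target
--         else:
--             unique_map[original] = f"{target}_{count + 1}"
--         seen[target] = count + 1
--     return unique_map
-- ===== SOURCE B (Python) =====
-- def _nth_name(target, k):
--     return target if k == 0 else f"{target}_{k + 1}"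
--
--
-- def make_unique_rename_map(rename_map: dict[str, str]) -> dict[str, str]:
--     items = list(rename_map.items())
--     return {
--         original: _nth_name(target, sum(1 for _, t in items[:i] if t == target))
--         for i, (original, target) in enumerate(items)
--     }
-- ===== Notes on version B (the rewrite author's own statement) =====
-- stated objective: alternative
-- what changed: Replaces the stateful single pass with a running 'seen' counter dict by a stateless dict comprehension that, for each entry, computes its duplicate index in closed form as the count of equal targets in the preceding prefix.
import Mathlib
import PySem

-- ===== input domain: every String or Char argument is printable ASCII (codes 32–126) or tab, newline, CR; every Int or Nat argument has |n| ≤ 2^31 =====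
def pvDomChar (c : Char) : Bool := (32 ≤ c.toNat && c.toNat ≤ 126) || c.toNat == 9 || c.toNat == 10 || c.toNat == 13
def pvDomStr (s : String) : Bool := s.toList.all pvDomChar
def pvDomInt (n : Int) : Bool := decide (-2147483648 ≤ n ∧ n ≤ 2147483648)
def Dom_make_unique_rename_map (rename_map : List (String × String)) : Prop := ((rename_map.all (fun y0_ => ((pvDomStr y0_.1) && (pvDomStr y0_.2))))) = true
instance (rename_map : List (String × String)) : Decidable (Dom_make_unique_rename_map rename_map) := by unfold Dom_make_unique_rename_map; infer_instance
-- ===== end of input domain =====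

-- B replaces A's stateful pass with a seen-counter dict by a stateless comprehension
-- computing each entry's duplicate index as a prefix count (alternative decomposition, not faster).

-- ===== PORT A =====
def make_unique_rename_map (rename_map : List (String × String)) : List (String × String) :=
  (rename_map.foldl
    (fun (st : PySem.Dict String Int × PySem.Dict String String) p =>
      let count := st.1.getD p.2 0
      let um := if count == 0 then st.2.insert p.1 p.2
                else st.2.insert p.1 (p.2 ++ "_" ++ PySem.Int.toStr (count + 1))
      (st.1.insert p.2 (count + 1), um))
    (PySem.Dict.empty, PySem.Dict.empty)).2.items

-- ===== PORT B =====
def nthName (target : String) (k : Int) : String :=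
  if k == 0 then target else target ++ "_" ++ PySem.Int.toStr (k + 1)

def make_unique_rename_map_alt (rename_map : List (String × String)) : List (String × String) :=
  ((PySem.List.enumerate rename_map).foldl
    (fun (d : PySem.Dict String String) ip =>
      d.insert ip.2.1 (nthName ip.2.2
        (((PySem.List.slice rename_map none (some ip.1)).filter (fun q => q.2 == ip.2.2)).length : Int)))
    PySem.Dict.empty).items

-- ===== PRECONDITION & SPEC =====
def Spec_make_unique_rename_map (rename_map : List (String × String)) (out : List (String × String)) : Prop := out = make_unique_rename_map_alt rename_map
instance (rename_map : List (String × String)) (out : List (String × String)) : Decidable (Spec_make_unique_rename_map rename_map out) := by unfold Spec_make_unique_rename_map; infer_instance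

-- ===== CLAIM (what is proved, stated in full; the proofs are below) =====
def Claim_equal_make_unique_rename_map : Prop := ∀ (rename_map : List (String × String)), Dom_make_unique_rename_map rename_map → Spec_make_unique_rename_map rename_map (make_unique_rename_map rename_map)

-- ===== LEMMAS AND PROOFS =====

-- Invariant: after processing `pre`, A's seen-counter at t holds the number of
-- pairs in `pre` whose target is t; then the rest of A's fold builds exactly
-- B's fold over the remaining enumerated entries of the full list.
theorem loop_eq (rest : List (String × String)) :
    ∀ (pre : List (String × String)) (seen : PySem.Dict String Int)
      (um : PySem.Dict String String),
    (∀ t, seen.getD t 0 = ((pre.filter (fun q => q.2 == t)).length : Int)) →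
    (rest.foldl
      (fun (st : PySem.Dict String Int × PySem.Dict String String) p =>
        let count := st.1.getD p.2 0
        let um := if count == 0 then st.2.insert p.1 p.2
                  else st.2.insert p.1 (p.2 ++ "_" ++ PySem.Int.toStr (count + 1))
        (st.1.insert p.2 (count + 1), um))
      (seen, um)).2 =
    (PySem.List.enumerate rest (pre.length : Int)).foldl
      (fun (d : PySem.Dict String String) ip =>
        d.insert ip.2.1 (nthName ip.2.2
          (((PySem.List.slice (pre ++ rest) none (some ip.1)).filter (fun q => q.2 == ip.2.2)).length : Int)))
      um := by
  induction rest with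
  | nil => intro pre seen um h; simp [PySem.List.enumerate_nil]
  | cons p rest ih =>
    intro pre seen um h
    rw [PySem.List.enumerate_cons]
    simp only [List.foldl_cons]
    have hslice : PySem.List.slice (pre ++ p :: rest) none (some (pre.length : Int)) = pre := by
      rw [PySem.List.slice_to_natCast]
      exact List.take_left
    have hval : (if seen.getD p.2 0 == 0 then um.insert p.1 p.2
        else um.insert p.1 (p.2 ++ "_" ++ PySem.Int.toStr (seen.getD p.2 0 + 1))) =
        um.insert p.1 (nthName p.2
          (((PySem.List.slice (pre ++ p :: rest) none (some (pre.length : Int))).filter (fun q => q.2 == p.2)).length : Int)) := by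
      rw [hslice, ← h p.2, nthName]
      split <;> rfl
    have harr : ∀ t, (seen.insert p.2 (seen.getD p.2 0 + 1)).getD t 0 =
        (((pre ++ [p]).filter (fun q => q.2 == t)).length : Int) := by
      intro t
      rw [PySem.Dict.getD_insert]
      by_cases ht : t = p.2
      · subst ht
        rw [if_pos rfl, h p.2]
        simp [List.filter_append]
      · rw [if_neg ht, h t]
        have : (p.2 == t) = false := by simp [BEq.comm]; exact fun hc => ht hc
        simp [List.filter_append, this]
    have := ih (pre ++ [p]) (seen.insert p.2 (seen.getD p.2 0 + 1))
      (um.insert p.1 (nthName p.2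
        (((PySem.List.slice (pre ++ p :: rest) none (some (pre.length : Int))).filter (fun q => q.2 == p.2)).length : Int)))
      harr
    simp only [List.append_assoc, List.singleton_append, List.length_append,
      List.length_singleton, Nat.cast_add, Nat.cast_one] at this
    simp only [hval]
    rw [this]

-- ===== VERDICT (by name: the statement is the Claim_ definition above) =====
theorem make_unique_rename_map_spec : Claim_equal_make_unique_rename_map := by
  intro rename_map _
  unfold Spec_make_unique_rename_map make_unique_rename_map make_unique_rename_map_alt
  have := loop_eq rename_map [] PySem.Dict.empty PySem.Dict.empty
    (by intro t; simp [PySem.Dict.getD_empty])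
  simp only [List.nil_append, List.length_nil, Nat.cast_zero] at this
  rw [this]
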